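-- pv_equiv track=rewrite | github.com/j23n/photo-tools | duplicates.py | merge_candidate_groups
-- ===== SOURCE A (Python) =====
-- def merge_candidate_groups(groups_a: list[list[str]], groups_b: list[list[str]]) -> list[list[str]]:
--     """Merge two lists of groups, deduplicating overlapping groups."""
--     merged = list(groups_a)
--     existing_tags: set[str] = {t for g in groups_a for t in g}
--     for group in groups_b:
--         overlap = [t for t in group if t in existing_tags]
--         if overlap:
--             # Extend an existing group that shares tags
--             for existing in merged:
--                 if any(t in existing for t in group):
--                     for t in group:
--                         if t not in existing:
--                             existing.append(t)
--                     break
--         else: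
--             merged.append(group)
--             for t in group:
--                 existing_tags.add(t)
--     return merged
-- ===== SOURCE B (Python) =====
-- def merge_candidate_groups(groups_a: list[list[str]], groups_b: list[list[str]]) -> list[list[str]]:
--     """Merge two lists of groups, deduplicating overlapping groups.
--
--     Same result as the scan-based version, but indexed: a dict maps each tag
--     to the smallest index of a merged group containing it, so the target
--     group for an overlapping group is found by dict lookups (min over its
--     indexed tags) instead of rescanning all merged groups, and a parallel
--     set per merged group makes the duplicate-tag test O(1).
--     Like the original, extends matched groups of groups_a in place.
--     """
--     merged = list(groups_a)
--     members = [set(g) for g in merged]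
--     existing_tags: set[str] = set()
--     first_idx: dict[str, int] = {}
--     for i, g in enumerate(merged):
--         for t in g:
--             existing_tags.add(t)
--             first_idx.setdefault(t, i)
--     for group in groups_b:
--         if any(t in existing_tags for t in group):
--             j = min(first_idx[t] for t in group if t in first_idx)
--             target = merged[j]
--             ms = members[j]
--             for t in group:
--                 if t not in ms:
--                     target.append(t)
--                 ms.add(t)
--                 if t not in first_idx or first_idx[t] > j:
--                     first_idx[t] = j
--         else:
--             k = len(merged)
--             merged.append(group)
--             members.append(set(group))
--             for t in group:
--                 existing_tags.add(t)
--                 first_idx.setdefault(t, k)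
--     return merged
-- ===== Notes on version B (the rewrite author's own statement) =====
-- stated objective: faster
-- what changed: Instead of rescanning all merged groups to find the first one sharing a tag with each incoming group (and rescanning that group's list for duplicates), B maintains a dict mapping every tag to the smallest index of a merged group containing it plus a membership set per merged group, so the target group is found by dict lookups (min over the group's indexed tags) and duplicate tests are O(1); the index is updated as groups grow.
import Mathlib
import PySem

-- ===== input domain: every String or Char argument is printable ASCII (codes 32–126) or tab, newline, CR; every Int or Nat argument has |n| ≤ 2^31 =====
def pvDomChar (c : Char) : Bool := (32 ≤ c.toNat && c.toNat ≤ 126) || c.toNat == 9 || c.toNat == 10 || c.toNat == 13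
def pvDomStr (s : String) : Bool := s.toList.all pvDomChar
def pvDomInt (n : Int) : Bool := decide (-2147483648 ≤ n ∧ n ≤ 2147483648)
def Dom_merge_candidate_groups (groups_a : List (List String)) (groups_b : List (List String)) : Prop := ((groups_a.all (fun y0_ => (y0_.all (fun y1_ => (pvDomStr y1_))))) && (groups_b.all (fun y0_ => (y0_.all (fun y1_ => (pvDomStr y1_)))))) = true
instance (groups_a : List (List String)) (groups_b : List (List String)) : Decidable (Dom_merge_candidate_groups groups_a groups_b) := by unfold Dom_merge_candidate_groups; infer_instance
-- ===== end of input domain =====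

-- B replaces A's linear rescan of `merged` for the first overlapping group by a
-- dict tag → least index of a containing group (objective: faster).
-- Both A and B extend matched groups of groups_a in place (same side effect);
-- the theorem below is about the return value.


-- ===== PORT A =====
-- `for t in group: if t not in existing: existing.append(t)`
def pvExtendA (existing : List String) (group : List String) : List String :=
  group.foldl (fun ex t => if ex.contains t then ex else ex ++ [t]) existing

-- `for existing in merged: if any(t in existing for t in group): …extend…; break`
-- (mutation of the first matching group, expressed functionally)
def pvExtendFirstA (merged : List (List String)) (group : List String) : List (List String) :=
  match merged with
  | [] => []
  | ex :: rest =>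
      if group.any (fun t => ex.contains t) then pvExtendA ex group :: rest
      else ex :: pvExtendFirstA rest group

-- one iteration of `for group in groups_b:`
def pvStepA (st : List (List String) × PySem.Set String) (group : List String) :
    List (List String) × PySem.Set String :=
  if group.filter (fun t => st.2.contains t) ≠ [] then (pvExtendFirstA st.1 group, st.2)
  else (st.1 ++ [group], group.foldl (fun s t => PySem.Set.add s t) st.2)

def merge_candidate_groups (groups_a : List (List String)) (groups_b : List (List String)) :
    List (List String) :=
  let merged := groups_a
  -- {t for g in groups_a for t in g}; only membership of the set is ever used
  let existing_tags := groups_a.foldl (fun s g => PySem.Set.update s g) PySem.Set.empty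
  (groups_b.foldl pvStepA (merged, existing_tags)).1

-- ===== PORT B =====
-- one step of `if t not in ms: target.append(t)` / `ms.add(t)` on (target, ms)
def pvGrowPairB (p : List String × PySem.Set String) (t : String) :
    List String × PySem.Set String :=
  (if p.2.contains t then p.1 else p.1 ++ [t], PySem.Set.add p.2 t)

-- one step of `if t not in first_idx or first_idx[t] > j: first_idx[t] = j`
def pvIdxLowerB (j : Nat) (d : PySem.Dict String Nat) (t : String) : PySem.Dict String Nat :=
  if d.contains t = false || j < d.getD t 0 then d.insert t j else d

-- `first_idx.setdefault(t, i)` with the current index i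
def pvSetDefB (n : Nat) (d : PySem.Dict String Nat) (t : String) : PySem.Dict String Nat :=
  d.setdefault t n

-- `for i, g in enumerate(merged): for t in g: existing_tags.add(t); first_idx.setdefault(t, i)`
def pvInitB : List (List String) → Nat → PySem.Set String → PySem.Dict String Nat →
    PySem.Set String × PySem.Dict String Nat
  | [], _, tags, idx => (tags, idx)
  | g :: rest, i, tags, idx =>
      let st := g.foldl
        (fun (p : PySem.Set String × PySem.Dict String Nat) t =>
          (PySem.Set.add p.1 t, pvSetDefB i p.2 t)) (tags, idx)
      pvInitB rest (i + 1) st.1 st.2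

-- one iteration of `for group in groups_b:`; state = (merged, existing_tags, members, first_idx)
def pvStepB
    (st : List (List String) × PySem.Set String × List (PySem.Set String) × PySem.Dict String Nat)
    (group : List String) :
    List (List String) × PySem.Set String × List (PySem.Set String) × PySem.Dict String Nat :=
  if group.any (fun t => st.2.1.contains t) then
    -- j = min(first_idx[t] for t in group if t in first_idx); target = merged[j]; ms = members[j]
    let j := (PySem.List.min? (group.filterMap (fun t => st.2.2.2.get? t)) (fun v => v)).getD 0
    let p := group.foldl
      (fun (p : (List String × PySem.Set String) × PySem.Dict String Nat) t =>
        (pvGrowPairB p.1 t, pvIdxLowerB j p.2 t))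
      ((st.1.getD j [], st.2.2.1.getD j []), st.2.2.2)
    (st.1.set j p.1.1, st.2.1, st.2.2.1.set j p.1.2, p.2)
  else
    (st.1 ++ [group],
     group.foldl (fun s t => PySem.Set.add s t) st.2.1,
     st.2.2.1 ++ [PySem.Set.ofList group],
     group.foldl (fun d t => d.setdefault t st.1.length) st.2.2.2)

def merge_candidate_groups_alt (groups_a : List (List String)) (groups_b : List (List String)) :
    List (List String) :=
  -- members = [set(g) for g in merged]
  let members := groups_a.map PySem.Set.ofList
  let init := pvInitB groups_a 0 PySem.Set.empty PySem.Dict.empty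
  (groups_b.foldl pvStepB (groups_a, init.1, members, init.2)).1

-- ===== PRECONDITION & SPEC =====
def Spec_merge_candidate_groups (groups_a : List (List String)) (groups_b : List (List String)) (out : List (List String)) : Prop := out = merge_candidate_groups_alt groups_a groups_b
instance (groups_a : List (List String)) (groups_b : List (List String)) (out : List (List String)) : Decidable (Spec_merge_candidate_groups groups_a groups_b out) := by unfold Spec_merge_candidate_groups; infer_instance

-- ===== CLAIM (what is proved, stated in full; the proofs are below) =====
def Claim_equal_merge_candidate_groups : Prop := ∀ (groups_a : List (List String)) (groups_b : List (List String)), Dom_merge_candidate_groups groups_a groups_b → Spec_merge_candidate_groups groups_a groups_b (merge_candidate_groups groups_a groups_b)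

-- ===== LEMMAS AND PROOFS =====

-- `t` occurs in some group of `m`
def pvHas (m : List (List String)) (t : String) : Bool := m.any (fun g => g.contains t)

-- each member set mirrors the membership of its merged group
def MemsInv (m : List (List String)) (mem : List (PySem.Set String)) : Prop :=
  mem.length = m.length ∧
  ∀ (i : Nat) (h1 : i < mem.length) (h2 : i < m.length) (s : String),
    (mem[i]'h1).contains s = (m[i]'h2).contains s

-- B's dict maps every tag present in `m` to the least index of a group containing it
def IdxInv (m : List (List String)) (idx : PySem.Dict String Nat) : Prop :=
  ∀ t, idx.get? t =
    if pvHas m t then some (List.findIdx (fun g => g.contains t) m) else none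

lemma mem_extendA (g : List String) : ∀ (ex : List String) (t : String),
    (pvExtendA ex g).contains t = (ex.contains t || g.contains t) := by
  induction g with
  | nil => simp [pvExtendA]
  | cons x xs ih =>
      intro ex t
      show (pvExtendA (if ex.contains x then ex else ex ++ [x]) xs).contains t = _
      rw [ih]
      by_cases hx : ex.contains x <;> by_cases ht : t = x <;>
        simp [ht] <;> simp_all

lemma contains_foldl_add (g : List String) : ∀ (s : PySem.Set String) (t : String),
    (g.foldl (fun s t => PySem.Set.add s t) s).contains t = (s.contains t || g.contains t) := by
  induction g with
  | nil => simp
  | cons x xs ih =>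
      intro s t
      show (xs.foldl _ (PySem.Set.add s x)).contains t = _
      rw [ih]
      by_cases ht : t = x <;> simp [ht, PySem.Set.mem_add]

lemma contains_foldl_update (ga : List (List String)) : ∀ (s : PySem.Set String) (t : String),
    (ga.foldl (fun s g => PySem.Set.update s g) s).contains t = (s.contains t || pvHas ga t) := by
  induction ga with
  | nil => simp [pvHas]
  | cons g rest ih =>
      intro s t
      show (rest.foldl _ (PySem.Set.update s g)).contains t = _
      rw [ih]
      have : PySem.Set.update s g = g.foldl (fun s t => PySem.Set.add s t) s := rfl
      rw [this, contains_foldl_add]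
      simp [pvHas, Bool.or_assoc]

lemma extendFirstA_eq_set (g : List String) : ∀ (m : List (List String)),
    List.findIdx (fun ex => g.any (fun t => ex.contains t)) m < m.length →
    pvExtendFirstA m g =
      m.set (List.findIdx (fun ex => g.any (fun t => ex.contains t)) m)
        (pvExtendA (m.getD (List.findIdx (fun ex => g.any (fun t => ex.contains t)) m) []) g) := by
  intro m
  induction m with
  | nil => simp
  | cons ex rest ih =>
      intro h
      rw [List.findIdx_cons] at h ⊢
      by_cases hp : g.any (fun t => ex.contains t)
      · unfold pvExtendFirstA
        simp only [hp, cond_true, if_true]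
        rfl
      · unfold pvExtendFirstA
        simp only [hp, Bool.false_eq_true, if_false, cond_false] at h ⊢
        have h' : List.findIdx (fun ex => g.any (fun t => ex.contains t)) rest < rest.length := by
          simpa using h
        rw [ih h']
        simp

lemma get?_foldl_setdefault (g : List String) (n : Nat) : ∀ (idx : PySem.Dict String Nat) (t : String),
    (g.foldl (fun d t => d.setdefault t n) idx).get? t =
      if idx.contains t then idx.get? t else if g.contains t then some n else none := by
  induction g with
  | nil => intro idx t; by_cases h : idx.contains t <;>
      simp [h, PySem.Dict.get?_eq_none_iff_contains]
  | cons x xs ih =>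
      intro idx t
      show (xs.foldl _ (idx.setdefault x n)).get? t = _
      rw [ih]
      by_cases hx : idx.contains x
      · rw [PySem.Dict.setdefault_of_contains _ _ hx]
        by_cases ht : idx.contains t <;> by_cases htx : t = x <;> simp_all
      · rw [PySem.Dict.setdefault_of_not_contains _ _ (by simp [hx])]
        by_cases htx : t = x
        · subst htx
          simp [PySem.Dict.get?_insert_self, hx]
        · have h1 : (idx.insert x n).contains t = idx.contains t := by
            simp [PySem.Dict.contains_insert]; intro h; exact absurd h htx
          have h2 : (idx.insert x n).get? t = idx.get? t :=
            PySem.Dict.get?_insert_of_ne _ _ (by simpa using htx)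
          rw [h1, h2]
          by_cases ht : idx.contains t <;> simp [ht, htx]

lemma get?_foldl_idxLower (g : List String) (j : Nat) : ∀ (idx : PySem.Dict String Nat) (t : String),
    (g.foldl (fun d t => pvIdxLowerB j d t) idx).get? t =
      if g.contains t then some ((idx.get? t).elim j (fun v => min v j)) else idx.get? t := by
  induction g with
  | nil => simp
  | cons x xs ih =>
      intro idx t
      show (xs.foldl _ (pvIdxLowerB j idx x)).get? t = _
      rw [ih]
      have hx : (pvIdxLowerB j idx x).get? x = some ((idx.get? x).elim j (fun v => min v j)) := by
        unfold pvIdxLowerB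
        rcases h : idx.get? x with _ | v
        · have : idx.contains x = false := by
            rw [PySem.Dict.contains_eq_isSome_get?, h]; rfl
          simp [this, PySem.Dict.get?_insert_self]
        · have hc : idx.contains x = true := by
            rw [PySem.Dict.contains_eq_isSome_get?, h]; rfl
          have hd : idx.getD x 0 = v := PySem.Dict.getD_of_get?_eq_some _ _ h
          by_cases hj : j < v
          · simp [hc, hd, hj, PySem.Dict.get?_insert_self, Nat.min_eq_right (le_of_lt hj)]
          · simp [hc, hd, hj, h, Nat.min_eq_left (Nat.le_of_not_lt hj)]
      have hne : ∀ t', t' ≠ x → (pvIdxLowerB j idx x).get? t' = idx.get? t' := by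
        intro t' ht'
        unfold pvIdxLowerB
        split
        · exact PySem.Dict.get?_insert_of_ne _ _ (by simpa using ht')
        · rfl
      by_cases htx : t = x
      · subst htx
        simp only [hx]
        split
        · rcases idx.get? t with _ | v <;> simp
        · simp
      · rw [hne t htx]
        simp [htx]

lemma idx_contains_eq (m : List (List String)) (idx : PySem.Dict String Nat)
    (hidx : IdxInv m idx) (t : String) : idx.contains t = pvHas m t := by
  rw [PySem.Dict.contains_eq_isSome_get?, hidx t]
  by_cases h : pvHas m t <;> simp [h]

lemma idxinv_append (m : List (List String)) (idx : PySem.Dict String Nat) (g : List String)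
    (hidx : IdxInv m idx) :
    IdxInv (m ++ [g]) (g.foldl (fun d t => d.setdefault t m.length) idx) := by
  intro t
  rw [get?_foldl_setdefault, idx_contains_eq m idx hidx t, hidx t]
  have hhas : pvHas (m ++ [g]) t = (pvHas m t || g.contains t) := by
    simp [pvHas, List.any_append]
  rw [hhas, List.findIdx_append]
  by_cases hm : pvHas m t
  · have hor : (pvHas m t || g.contains t) = true := by rw [hm]; rw [Bool.true_or]
    have hlt : List.findIdx (fun g' => g'.contains t) m < m.length := by
      rw [List.findIdx_lt_length]
      simpa [pvHas, List.any_eq_true] using hm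
    rw [if_pos hm, if_pos hor, if_pos hlt]
    rw [if_pos hm]
  · have hmf : pvHas m t = false := by simpa using hm
    have hnlt : ¬ List.findIdx (fun g' => g'.contains t) m < m.length := by
      rw [List.findIdx_lt_length]
      simpa [pvHas, List.any_eq_true] using hm
    rw [if_neg hm]
    by_cases hg : g.contains t
    · have hor : (pvHas m t || g.contains t) = true := by rw [hmf, hg]; rfl
      have hfg : List.findIdx (fun g' => g'.contains t) [g] = 0 := by
        rw [List.findIdx_cons, hg]; rfl
      rw [if_pos hg, if_pos hor, if_neg hnlt, hfg, Nat.zero_add]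
    · rw [if_neg hg, if_neg (by simp [hmf]; simpa using hg)]

lemma min_idx_eq_findIdx (m : List (List String)) (idx : PySem.Dict String Nat) (g : List String)
    (hidx : IdxInv m idx) (hov : ∃ t ∈ g, pvHas m t) :
    (PySem.List.min? (g.filterMap (fun t => idx.get? t)) (fun v => v)).getD 0 =
      List.findIdx (fun ex => g.any (fun t => ex.contains t)) m ∧
    List.findIdx (fun ex => g.any (fun t => ex.contains t)) m < m.length := by
  set P : List String → Bool := fun ex => g.any (fun t => ex.contains t) with hP
  obtain ⟨t0, ht0g, ht0⟩ := hov
  have hj0 : List.findIdx P m < m.length := by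
    rw [List.findIdx_lt_length]
    simp only [pvHas, List.any_eq_true] at ht0
    obtain ⟨ex, hex, hct⟩ := ht0
    refine ⟨ex, hex, ?_⟩
    simp only [hP, List.any_eq_true]
    exact ⟨t0, ht0g, hct⟩
  set j0 := List.findIdx P m with hj0def
  refine ⟨?_, hj0⟩
  have hge : ∀ v ∈ g.filterMap (fun t => idx.get? t), j0 ≤ v := by
    intro v hv
    obtain ⟨t, htg, hget⟩ := List.mem_filterMap.1 hv
    have hthis := hidx t
    rw [hget] at hthis
    by_cases hp : pvHas m t
    · rw [if_pos hp] at hthis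
      have hveq : v = List.findIdx (fun g' => g'.contains t) m := Option.some.inj hthis
      subst hveq
      have hvlt : List.findIdx (fun g' => g'.contains t) m < m.length := by
        rw [List.findIdx_lt_length]
        simp only [pvHas, List.any_eq_true] at hp
        exact hp
      by_contra hlt
      have hPv : P (m[List.findIdx (fun g' => g'.contains t) m]'hvlt) = false :=
        List.not_of_lt_findIdx (by omega)
      have hkey : (m[List.findIdx (fun g' => g'.contains t) m]'hvlt).contains t = true :=
        List.findIdx_getElem (w := hvlt)
      simp only [hP, List.any_eq_false] at hPv
      exact (hPv t htg) hkey
    · rw [if_neg hp] at hthis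
      exact absurd hthis (by simp)
  have hPj0 : P (m[j0]'hj0) = true := List.findIdx_getElem (w := hj0)
  have hcand : ∃ t ∈ g, idx.get? t = some j0 := by
    simp only [hP, List.any_eq_true] at hPj0
    obtain ⟨t, htg, hct⟩ := hPj0
    have hhas : pvHas m t = true := by
      simp only [pvHas, List.any_eq_true]
      exact ⟨m[j0]'hj0, List.getElem_mem _, hct⟩
    have hvt := hidx t
    rw [if_pos hhas] at hvt
    have hle : List.findIdx (fun g' => g'.contains t) m ≤ j0 := by
      by_contra hlt
      have hfalse : (m[j0]'hj0).contains t = false :=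
        List.not_of_lt_findIdx (p := fun g' => g'.contains t) (xs := m) (i := j0) (by omega)
      exact absurd (hct.symm.trans hfalse) (by simp)
    have hgev : j0 ≤ List.findIdx (fun g' => g'.contains t) m :=
      hge _ (List.mem_filterMap.2 ⟨t, htg, hvt⟩)
    exact ⟨t, htg, by rw [hvt]; congr 1; omega⟩
  obtain ⟨t, htg, hsome⟩ := hcand
  have hmem : j0 ∈ g.filterMap (fun t => idx.get? t) := List.mem_filterMap.2 ⟨t, htg, hsome⟩
  rcases hmin : PySem.List.min? (g.filterMap (fun t => idx.get? t)) (fun v => v) with _ | v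
  · rw [PySem.List.min?_eq_none_iff] at hmin
    rw [hmin] at hmem
    simp at hmem
  · have h1 := PySem.List.min?_isMin hmin j0 hmem
    have h2 := hge v (PySem.List.min?_mem hmin)
    simp only [Option.getD_some]
    omega

lemma findIdx_set_congr (p : List String → Bool) : ∀ (m : List (List String)) (j : Nat)
    (v : List String) (hj : j < m.length), p v = p (m[j]'hj) →
    List.findIdx p (m.set j v) = List.findIdx p m := by
  intro m
  induction m with
  | nil => simp
  | cons x rest ih =>
      intro j v hj hpv
      cases j with
      | zero =>
          show List.findIdx p (v :: rest) = _
          rw [List.findIdx_cons, List.findIdx_cons, hpv]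
          rfl
      | succ n =>
          show List.findIdx p (x :: rest.set n v) = _
          rw [List.findIdx_cons, List.findIdx_cons,
            ih n v (by simpa using hj) (by simpa using hpv)]

lemma idxinv_set_extend (m : List (List String)) (idx : PySem.Dict String Nat) (g : List String)
    (j0 : Nat) (hj : j0 < m.length) (hidx : IdxInv m idx) :
    IdxInv (m.set j0 (pvExtendA (m.getD j0 []) g))
      (g.foldl (fun d t => pvIdxLowerB j0 d t) idx) := by
  intro t
  have hgd : m.getD j0 [] = m[j0]'hj := List.getD_eq_getElem m [] hj
  set ext := pvExtendA (m.getD j0 []) g with hext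
  have hextmem : ∀ s, ext.contains s = ((m[j0]'hj).contains s || g.contains s) := by
    intro s; rw [hext, mem_extendA, hgd]
  have len' : (m.set j0 ext).length = m.length := List.length_set ..
  rw [get?_foldl_idxLower, hidx t]
  by_cases hg : g.contains t
  · rw [if_pos hg]
    have hext_t : ext.contains t = true := by rw [hextmem t, hg]; simp
    have hmem' : (m.set j0 ext)[j0]'(by omega) = ext := List.getElem_set_self ..
    have hhas' : pvHas (m.set j0 ext) t = true := by
      rw [pvHas, List.any_eq_true]
      exact ⟨ext, List.mem_iff_getElem.2 ⟨j0, by omega, hmem'⟩, hext_t⟩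
    rw [if_pos hhas']
    by_cases hpm : pvHas m t
    · rw [if_pos hpm]
      set v := List.findIdx (fun g' => g'.contains t) m with hv
      have hvlt : v < m.length := by
        rw [hv, List.findIdx_lt_length]
        simpa [pvHas, List.any_eq_true] using hpm
      have hvelem : List.findIdx (List.elem t) m = v := rfl
      have helim : (some v).elim j0 (fun w => min w j0) = min v j0 := rfl
      rw [helim]
      congr 1
      by_cases hle : j0 ≤ v
      · rw [Nat.min_eq_right hle]
        symm
        rw [List.findIdx_eq (by omega)]
        constructor
        · have : (m.set j0 ext)[j0]'(by omega) = ext := hmem'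
          rw [this]; exact hext_t
        · intro i hi
          have hne : j0 ≠ i := by omega
          have : (m.set j0 ext)[i]'(by omega) = m[i]'(by omega) := List.getElem_set_ne hne (by omega)
          rw [this]
          exact List.not_of_lt_findIdx (by omega)
      · have hlt : v < j0 := by omega
        rw [Nat.min_eq_left (by omega)]
        symm
        rw [List.findIdx_eq (by omega)]
        constructor
        · have hne : j0 ≠ v := by omega
          have : (m.set j0 ext)[v]'(by omega) = m[v]'(by omega) := List.getElem_set_ne hne (by omega)
          rw [this]
          exact List.findIdx_getElem (w := hvlt)
        · intro i hi
          have hne : j0 ≠ i := by omega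
          have : (m.set j0 ext)[i]'(by omega) = m[i]'(by omega) := List.getElem_set_ne hne (by omega)
          rw [this]
          exact List.not_of_lt_findIdx (by omega)
    · rw [if_neg hpm]
      have helim : (Option.none).elim j0 (fun w : Nat => min w j0) = j0 := rfl
      rw [helim]
      congr 1
      symm
      rw [List.findIdx_eq (by omega)]
      constructor
      · rw [hmem']; exact hext_t
      · intro i hi
        have hne : j0 ≠ i := by omega
        have : (m.set j0 ext)[i]'(by omega) = m[i]'(by omega) := List.getElem_set_ne hne (by omega)
        rw [this]
        have hall : ∀ x ∈ m, x.contains t = false := by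
          intro x hx
          by_contra hc
          apply hpm
          rw [pvHas, List.any_eq_true]
          exact ⟨x, hx, by simpa using hc⟩
        exact hall _ (List.getElem_mem _)
  · rw [if_neg hg]
    have hext_t : ext.contains t = (m[j0]'hj).contains t := by
      rw [hextmem t, (by simpa using hg : g.contains t = false), Bool.or_false]
    have hfind := findIdx_set_congr (fun g' => g'.contains t) m j0 ext hj hext_t
    have hhas_eq : pvHas (m.set j0 ext) t = pvHas m t := by
      rw [Bool.eq_iff_iff]
      rw [pvHas, List.any_eq_true, ← List.findIdx_lt_length,
        pvHas, List.any_eq_true, ← List.findIdx_lt_length, hfind, len']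
    rw [hhas_eq, hfind]

lemma pvHas_set_extend (m : List (List String)) (g : List String) (t : String) (j0 : Nat)
    (hj : j0 < m.length) (h : pvHas m t = true) :
    pvHas (m.set j0 (pvExtendA (m.getD j0 []) g)) t = true := by
  rw [pvHas, List.any_eq_true] at h ⊢
  obtain ⟨x, hx, hct⟩ := h
  obtain ⟨i, hilt, hieq⟩ := List.mem_iff_getElem.1 hx
  by_cases hij : i = j0
  · subst hij
    refine ⟨pvExtendA (m.getD i []) g, List.mem_iff_getElem.2 ⟨i, by simpa using hilt,
      List.getElem_set_self ..⟩, ?_⟩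
    have hmem : (pvExtendA (m.getD i []) g).contains t = true := by
      rw [mem_extendA]
      have hgd : (m.getD i []).contains t = true := by
        rw [List.getD_eq_getElem m [] hilt]
        have h' : m[i]'hilt = x := hieq
        rw [h']; exact hct
      rw [hgd, Bool.true_or]
    simpa using hmem
  · exact ⟨x, List.mem_iff_getElem.2 ⟨i, by simpa using hilt,
      by rw [List.getElem_set_ne (by omega) (by simpa using hilt)]; exact hieq⟩, hct⟩

lemma grow_pair_spec (g : List String) : ∀ (target : List String) (ms : PySem.Set String),
    (∀ s, ms.contains s = target.contains s) →
    (g.foldl pvGrowPairB (target, ms)).1 = pvExtendA target g ∧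
    (∀ s, (g.foldl pvGrowPairB (target, ms)).2.contains s = (pvExtendA target g).contains s) := by
  induction g with
  | nil => intro target ms h; exact ⟨rfl, fun s => h s⟩
  | cons t ts ih =>
      intro target ms h
      have hstep : pvGrowPairB (target, ms) t =
          (if target.contains t then target else target ++ [t], PySem.Set.add ms t) := by
        rw [pvGrowPairB, h t]
      have hm : ∀ s, (s ∈ ms) ↔ s ∈ target := by
        intro s
        have hh := h s
        rw [Bool.eq_iff_iff] at hh
        simpa [PySem.Set.contains_iff] using hh
      have hinv : ∀ s, (PySem.Set.add ms t).contains s =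
          (if target.contains t then target else target ++ [t]).contains s := by
        intro s
        rw [Bool.eq_iff_iff]
        by_cases hc : target.contains t
        · have htm : t ∈ target := by simpa using hc
          rw [if_pos hc]
          simp only [PySem.Set.contains_iff, PySem.Set.mem_add, hm s]
          constructor
          · rintro (hs | rfl)
            · simpa using hs
            · simpa using htm
          · intro hs; exact Or.inl (by simpa using hs)
        · rw [if_neg hc]
          simp only [PySem.Set.contains_iff, PySem.Set.mem_add, hm s]
          simp [List.mem_append]
      simp only [List.foldl_cons]
      rw [hstep]
      have hA : pvExtendA target (t :: ts) =
          pvExtendA (if target.contains t then target else target ++ [t]) ts := rfl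
      rw [hA]
      exact ih _ _ hinv

lemma step_sim (m : List (List String)) (sA sB : PySem.Set String)
    (mems : List (PySem.Set String)) (idx : PySem.Dict String Nat) (g : List String)
    (htags : ∀ t, sA.contains t = sB.contains t)
    (hmems : MemsInv m mems)
    (hidx : IdxInv m idx)
    (hsub : ∀ t, sA.contains t = true → pvHas m t = true) :
    (pvStepA (m, sA) g).1 = (pvStepB (m, sB, mems, idx) g).1 ∧
    (∀ t, (pvStepA (m, sA) g).2.contains t = (pvStepB (m, sB, mems, idx) g).2.1.contains t) ∧
    MemsInv (pvStepA (m, sA) g).1 (pvStepB (m, sB, mems, idx) g).2.2.1 ∧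
    IdxInv (pvStepA (m, sA) g).1 (pvStepB (m, sB, mems, idx) g).2.2.2 ∧
    (∀ t, (pvStepA (m, sA) g).2.contains t = true → pvHas (pvStepA (m, sA) g).1 t = true) := by
  by_cases hb : g.any (fun t => sB.contains t)
  · -- overlap branch on both sides
    obtain ⟨t0, ht0g, ht0B⟩ := List.any_eq_true.1 hb
    have ht0A : sA.contains t0 = true := by rw [htags t0]; exact ht0B
    have hA : g.filter (fun t => sA.contains t) ≠ [] := by
      intro hnil
      rw [List.filter_eq_nil_iff] at hnil
      exact (hnil t0 ht0g) ht0A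
    have hov : ∃ t ∈ g, pvHas m t := ⟨t0, ht0g, hsub t0 ht0A⟩
    obtain ⟨hjeq, hjlt⟩ := min_idx_eq_findIdx m idx g hidx hov
    simp only [pvStepA, pvStepB, if_pos hA, if_pos hb, PySem.List.foldl_prod_mk]
    set j0 := List.findIdx (fun ex => g.any (fun t => ex.contains t)) m with hj0
    rw [hjeq]
    have hjm : j0 < mems.length := by rw [hmems.1]; exact hjlt
    have hms : ∀ s, (mems.getD j0 []).contains s = ((m.getD j0 [] : List String)).contains s := by
      intro s
      rw [List.getD_eq_getElem mems [] hjm, List.getD_eq_getElem m [] hjlt]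
      exact hmems.2 j0 hjm hjlt s
    obtain ⟨hg1, hg2⟩ := grow_pair_spec g (m.getD j0 []) (mems.getD j0 []) hms
    rw [hg1]
    refine ⟨extendFirstA_eq_set g m hjlt, fun t => htags t, ?_, ?_, ?_⟩
    · -- MemsInv preserved
      rw [extendFirstA_eq_set g m hjlt]
      refine ⟨by simp [hmems.1], ?_⟩
      intro i h1 h2 s
      by_cases hij : i = j0
      · subst hij
        have e1 : (mems.set j0 (g.foldl pvGrowPairB (m.getD j0 [], mems.getD j0 [])).2)[j0]'h1 =
            (g.foldl pvGrowPairB (m.getD j0 [], mems.getD j0 [])).2 := List.getElem_set_self ..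
        have e2 : ((m.set j0 (pvExtendA (m.getD j0 []) g))[j0]'h2) = pvExtendA (m.getD j0 []) g :=
          List.getElem_set_self ..
        rw [e1, e2]
        exact hg2 s
      · have e1 := List.getElem_set_ne (l := mems) (a := (g.foldl pvGrowPairB (m.getD j0 [], mems.getD j0 [])).2) (fun h => hij h.symm) h1
        have e2 := List.getElem_set_ne (l := m) (a := pvExtendA (m.getD j0 []) g) (fun h => hij h.symm) h2
        rw [e1, e2]
        exact hmems.2 i (by simpa using h1) (by simpa using h2) s
    · rw [extendFirstA_eq_set g m hjlt]
      exact idxinv_set_extend m idx g j0 hjlt hidx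
    · intro t ht
      rw [extendFirstA_eq_set g m hjlt]
      exact pvHas_set_extend m g t j0 hjlt (hsub t ht)
  · -- no overlap: append on both sides
    have hA : ¬ g.filter (fun t => sA.contains t) ≠ [] := by
      intro hne
      apply hne
      rw [List.filter_eq_nil_iff]
      intro a ha hc
      apply hb
      rw [List.any_eq_true]
      exact ⟨a, ha, by rw [← htags a]; simpa using hc⟩
    simp only [pvStepA, pvStepB, if_neg hA, if_neg hb]
    refine ⟨by trivial, ?_, ?_, idxinv_append m idx g hidx, ?_⟩
    · intro t
      rw [contains_foldl_add, contains_foldl_add, htags t]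
    · -- MemsInv preserved by appending (g, set(g))
      refine ⟨by simp [hmems.1], ?_⟩
      intro i h1 h2 s
      by_cases hi : i < m.length
      · have hi1 : i < mems.length := by rw [hmems.1]; exact hi
        rw [List.getElem_append_left hi1, List.getElem_append_left hi]
        exact hmems.2 i hi1 hi s
      · have hlen := hmems.1
        have hi2 : i = m.length := by
          have := h2; simp at this; omega
        have e1 : (mems ++ [PySem.Set.ofList g])[i]'h1 = PySem.Set.ofList g := by
          rw [List.getElem_append_right (by omega)]
          simp [hmems.1, hi2]
        have e2 : (m ++ [g])[i]'h2 = g := by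
          rw [List.getElem_append_right (by omega)]
          simp [hi2]
        rw [e1, e2]
        rw [Bool.eq_iff_iff]
        simp [PySem.Set.mem_ofList]
    · intro t ht
      rw [contains_foldl_add] at ht
      have hhas : pvHas (m ++ [g]) t = (pvHas m t || g.contains t) := by
        simp [pvHas, List.any_append]
      rw [hhas]
      rcases Bool.or_eq_true_iff.1 ht with h | h
      · rw [hsub t h]; rfl
      · rw [h, Bool.or_true]

lemma fold_sim (gb : List (List String)) :
    ∀ (m : List (List String)) (sA sB : PySem.Set String)
    (mems : List (PySem.Set String)) (idx : PySem.Dict String Nat),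
    (∀ t, sA.contains t = sB.contains t) → MemsInv m mems → IdxInv m idx →
    (∀ t, sA.contains t = true → pvHas m t = true) →
    (gb.foldl pvStepA (m, sA)).1 = (gb.foldl pvStepB (m, sB, mems, idx)).1 := by
  induction gb with
  | nil => intro m sA sB mems idx _ _ _ _; rfl
  | cons g rest ih =>
      intro m sA sB mems idx htags hmems hidx hsub
      simp only [List.foldl_cons]
      obtain ⟨h1, h2, h3, h4, h5⟩ := step_sim m sA sB mems idx g htags hmems hidx hsub
      have hB : pvStepB (m, sB, mems, idx) g =
          ((pvStepA (m, sA) g).1, (pvStepB (m, sB, mems, idx) g).2.1,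
           (pvStepB (m, sB, mems, idx) g).2.2.1, (pvStepB (m, sB, mems, idx) g).2.2.2) := by
        rw [h1]
      have hA : pvStepA (m, sA) g = ((pvStepA (m, sA) g).1, (pvStepA (m, sA) g).2) := rfl
      rw [hB, hA]
      exact ih _ _ _ _ _ h2 h3 h4 h5

lemma initB_spec (rest : List (List String)) :
    ∀ (pre : List (List String)) (tags : PySem.Set String) (idx : PySem.Dict String Nat),
    IdxInv pre idx →
    (∀ t, (pvInitB rest pre.length tags idx).1.contains t = (tags.contains t || pvHas rest t)) ∧
    IdxInv (pre ++ rest) (pvInitB rest pre.length tags idx).2 := by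
  induction rest with
  | nil =>
      intro pre tags idx hpre
      exact ⟨fun t => by simp [pvInitB, pvHas], by simpa using hpre⟩
  | cons g rs ih =>
      intro pre tags idx hpre
      have hshow : pvInitB (g :: rs) pre.length tags idx =
          pvInitB rs (pre.length + 1)
            (List.foldl (fun s t => PySem.Set.add s t) tags g)
            (List.foldl (fun d t => d.setdefault t pre.length) idx g) := by
        show pvInitB rs (pre.length + 1)
            (g.foldl (fun (p : PySem.Set String × PySem.Dict String Nat) t =>
              (PySem.Set.add p.1 t, pvSetDefB pre.length p.2 t)) (tags, idx)).1
            (g.foldl _ (tags, idx)).2 = _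
        simp only [PySem.List.foldl_prod_mk]
        rfl
      have hlen : (pre ++ [g]).length = pre.length + 1 := by simp
      have hpre' : IdxInv (pre ++ [g])
          (List.foldl (fun d t => d.setdefault t pre.length) idx g) :=
        idxinv_append pre idx g hpre
      have := ih (pre ++ [g]) (List.foldl (fun s t => PySem.Set.add s t) tags g)
        (List.foldl (fun d t => d.setdefault t pre.length) idx g) hpre'
      rw [hlen] at this
      rw [hshow]
      refine ⟨?_, ?_⟩
      · intro t
        rw [this.1 t, contains_foldl_add]
        simp [pvHas, Bool.or_assoc]
      · have h2 := this.2
        rwa [List.append_assoc, List.singleton_append] at h2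

-- ===== VERDICT (by name: the statement is the Claim_ definition above) =====
theorem merge_candidate_groups_spec : Claim_equal_merge_candidate_groups := by
  intro ga gb _
  unfold Spec_merge_candidate_groups merge_candidate_groups merge_candidate_groups_alt
  have hinit := initB_spec ga [] PySem.Set.empty PySem.Dict.empty
    (by intro t; simp [pvHas, PySem.Dict.get?_empty])
  simp only [List.length_nil] at hinit
  have h := fold_sim gb ga
    (ga.foldl (fun s g => PySem.Set.update s g) PySem.Set.empty)
    (pvInitB ga 0 PySem.Set.empty PySem.Dict.empty).1
    (ga.map PySem.Set.ofList)
    (pvInitB ga 0 PySem.Set.empty PySem.Dict.empty).2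
    ?_ ?_ ?_ ?_
  · exact h
  · intro t
    rw [contains_foldl_update, (hinit.1 t)]
  · refine ⟨by simp, ?_⟩
    intro i h1 h2 s
    have e1 : (ga.map PySem.Set.ofList)[i]'h1 = PySem.Set.ofList (ga[i]'h2) := by
      simp
    rw [e1, Bool.eq_iff_iff]
    simp [PySem.Set.mem_ofList]
  · simpa using hinit.2
  · intro t ht
    rw [contains_foldl_update] at ht
    simpa using ht
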